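-- pv_equiv track=rewrite | github.com/MaxSchmitz/cosmos-chessbot | scripts/_archive/testing/test_fen_perception.py | expand_rank
-- ===== SOURCE A (Python) =====
-- def expand_rank(rank_str: str) -> str:
--     """Expand rank notation to 8 characters.
--
--     Args:
--         rank_str: Rank string (e.g., "1B1B3R" = "_B_B___R")
--
--     Returns:
--         8-character string with _ for empty squares
--     """
--     result = []
--     for char in rank_str:
--         if char.isdigit():
--             # Empty squares
--             result.extend(['_'] * int(char))
--         else:
--             # Piece
--             result.append(char)
--     return ''.join(result)
-- ===== SOURCE B (Python) =====
-- # Staged global rewrites: ten whole-string str.replace passes, one per digit,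
-- # each expanding every occurrence of that digit to its run of underscores.
-- # Correct because replacements only ever introduce '_' (never a digit), so the
-- # passes are independent of their order and of each other.
-- def expand_rank(rank_str: str) -> str:
--     for d in range(10):
--         rank_str = rank_str.replace(str(d), '_' * d)
--     return rank_str
-- ===== Notes on version B (the rewrite author's own statement) =====
-- stated objective: faster
-- what changed: Replaces the single per-character loop (isdigit/int branch building a result list) by ten staged whole-string str.replace passes, one per digit, each globally expanding that digit to its underscore run; no result list or per-char branch is kept.
import Mathlib
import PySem

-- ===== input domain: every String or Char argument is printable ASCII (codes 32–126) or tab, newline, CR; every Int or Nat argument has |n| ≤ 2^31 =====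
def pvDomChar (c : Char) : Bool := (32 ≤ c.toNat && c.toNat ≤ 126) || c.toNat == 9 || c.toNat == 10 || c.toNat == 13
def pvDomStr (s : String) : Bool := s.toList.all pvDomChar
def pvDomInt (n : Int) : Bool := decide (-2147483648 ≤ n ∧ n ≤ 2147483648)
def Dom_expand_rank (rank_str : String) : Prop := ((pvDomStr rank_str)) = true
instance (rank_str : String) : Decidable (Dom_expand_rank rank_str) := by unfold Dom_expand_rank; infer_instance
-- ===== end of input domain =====

-- B replaces A's single per-char loop (isdigit/int branch, result list) by ten
-- staged whole-string str.replace passes, one per digit; replacements only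
-- introduce '_', never a digit, so the passes are independent.

-- ===== PORT A =====
-- loop: result list of chars; extend with int(char) underscores on digits, append the char otherwise; ''.join at the end
def expand_rank (rank_str : String) : String :=
  let result : List Char :=
    rank_str.toList.foldl
      (fun acc c =>
        if PySem.Chars.isdigit c then
          acc ++ List.replicate ((PySem.Int.ofChars? [c]).getD 0).toNat '_'
        else
          acc ++ [c])
      []
  String.ofList result

-- ===== PORT B =====
-- for d in range(10): rank_str = rank_str.replace(str(d), '_' * d)
def expand_rank_alt (rank_str : String) : String :=
  (PySem.List.pyRange 0 10 1).foldl
    (fun s n =>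
      PySem.Str.replace s (String.ofList [Char.ofNat (48 + n.toNat)])
        (String.ofList (List.replicate n.toNat '_')))
    rank_str

-- ===== PRECONDITION & SPEC =====
def Spec_expand_rank (rank_str : String) (out : String) : Prop := out = expand_rank_alt rank_str
instance (rank_str : String) (out : String) : Decidable (Spec_expand_rank rank_str out) := by unfold Spec_expand_rank; infer_instance

-- ===== CLAIM (what is proved, stated in full; the proofs are below) =====
def Claim_equal_expand_rank : Prop := ∀ (rank_str : String), Dom_expand_rank rank_str → Spec_expand_rank rank_str (expand_rank rank_str)

-- ===== LEMMAS AND PROOFS =====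

-- a char with isdigit = true is one of the ten ASCII digits
lemma pv_digit_cases (c : Char) (h : PySem.Chars.isdigit c = true) :
    c ∈ ['0','1','2','3','4','5','6','7','8','9'] := by
  simp [PySem.Chars.isdigit, Char.le_def, UInt32.le_iff_toNat_le] at h
  obtain ⟨h1, h2⟩ := h
  have h1' : 48 ≤ c.toNat := h1
  have h2' : c.toNat ≤ 57 := h2
  have hc : ∀ (k : Nat), c.toNat = k → c = Char.ofNat k := by
    rintro k rfl; exact (Char.ofNat_toNat c).symm
  interval_cases hn : c.toNat <;> simp [hc _ rfl]

-- replace.go on the empty list returns the accumulator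
lemma pv_go_nil (d : Char) (new : List Char) (f : Nat) (acc : List Char) :
    PySem.Chars.replace.go [d] new f [] acc = acc.reverse := by
  rw [PySem.Chars.replace.go.eq_def]
  cases f <;> simp

-- one step of replace.go with a single-char pattern
lemma pv_go_cons (d : Char) (new : List Char) (f : Nat) (c : Char) (t acc : List Char) :
    PySem.Chars.replace.go [d] new (f+1) (c :: t) acc =
      if d = c then PySem.Chars.replace.go [d] new f t (new.reverse ++ acc)
      else PySem.Chars.replace.go [d] new f t (c :: acc) := by
  rw [PySem.Chars.replace.go.eq_def]
  by_cases h : d = c <;> simp [List.isPrefixOf, h]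

-- replace.go with a single-char pattern is the per-occurrence substitution
lemma pv_go_single (d : Char) (new : List Char) :
    ∀ (l : List Char) (fuel : Nat) (acc : List Char), l.length ≤ fuel →
      PySem.Chars.replace.go [d] new fuel l acc
        = acc.reverse ++ l.flatMap (fun c => if c = d then new else [c]) := by
  intro l
  induction l with
  | nil =>
      intro fuel acc _
      simp [pv_go_nil]
  | cons c t ih =>
      intro fuel acc hlen
      cases fuel with
      | zero => simp at hlen
      | succ f =>
          rw [pv_go_cons]
          by_cases hdc : d = c
          · subst hdc
            rw [if_pos rfl, ih f (new.reverse ++ acc) (by simpa using hlen)]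
            simp
          · rw [if_neg hdc, ih f (c :: acc) (by simpa using hlen)]
            simp [Ne.symm hdc]

-- replace with a single-char pattern is flatMap of a per-char substitution
lemma pv_replace_single (d : Char) (new l : List Char) :
    PySem.Chars.replace l [d] new
      = l.flatMap (fun c => if c = d then new else [c]) := by
  rw [PySem.Chars.replace]
  simp [pv_go_single d new l l.length [] le_rfl]

-- the composition of B's ten per-char substitutions equals A's per-char piece
lemma pv_chain (c : Char) :
    (List.flatMap (fun c => if c = Char.ofNat (48 + (9:Int).toNat) then List.replicate ((9:Int).toNat) '_' else [c])
      (List.flatMap (fun c => if c = Char.ofNat (48 + (8:Int).toNat) then List.replicate ((8:Int).toNat) '_' else [c])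
      (List.flatMap (fun c => if c = Char.ofNat (48 + (7:Int).toNat) then List.replicate ((7:Int).toNat) '_' else [c])
      (List.flatMap (fun c => if c = Char.ofNat (48 + (6:Int).toNat) then List.replicate ((6:Int).toNat) '_' else [c])
      (List.flatMap (fun c => if c = Char.ofNat (48 + (5:Int).toNat) then List.replicate ((5:Int).toNat) '_' else [c])
      (List.flatMap (fun c => if c = Char.ofNat (48 + (4:Int).toNat) then List.replicate ((4:Int).toNat) '_' else [c])
      (List.flatMap (fun c => if c = Char.ofNat (48 + (3:Int).toNat) then List.replicate ((3:Int).toNat) '_' else [c])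
      (List.flatMap (fun c => if c = Char.ofNat (48 + (2:Int).toNat) then List.replicate ((2:Int).toNat) '_' else [c])
      (List.flatMap (fun c => if c = Char.ofNat (48 + (1:Int).toNat) then List.replicate ((1:Int).toNat) '_' else [c])
      (if c = Char.ofNat (48 + (0:Int).toNat) then List.replicate ((0:Int).toNat) '_' else [c]))))))))))
      = (if PySem.Chars.isdigit c then
          List.replicate ((PySem.Int.ofChars? [c]).getD 0).toNat '_'
        else [c]) := by
  simp only [show ((0:Int).toNat) = 0 from by decide, show ((1:Int).toNat) = 1 from by decide, show ((2:Int).toNat) = 2 from by decide, show ((3:Int).toNat) = 3 from by decide, show ((4:Int).toNat) = 4 from by decide, show ((5:Int).toNat) = 5 from by decide, show ((6:Int).toNat) = 6 from by decide, show ((7:Int).toNat) = 7 from by decide, show ((8:Int).toNat) = 8 from by decide, show ((9:Int).toNat) = 9 from by decide]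
  by_cases hd : PySem.Chars.isdigit c = true
  · have hm := pv_digit_cases c hd
    fin_cases hm <;> decide
  · have hd' : PySem.Chars.isdigit c = false := by simpa using hd
    have hne : ∀ d : Char, PySem.Chars.isdigit d = true → c ≠ d := by
      intro d hdd e; subst e; rw [hd'] at hdd; cases hdd
    simp [hd', hne '0' (by decide), hne '1' (by decide), hne '2' (by decide),
      hne '3' (by decide), hne '4' (by decide), hne '5' (by decide),
      hne '6' (by decide), hne '7' (by decide), hne '8' (by decide),
      hne '9' (by decide)]

-- B's ten staged replaces on a whole list, fused into one flatMap of A's per-char piece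
lemma pv_chainList (l : List Char) :
    (List.flatMap (fun c => if c = Char.ofNat (48 + (9:Int).toNat) then List.replicate ((9:Int).toNat) '_' else [c])
      (List.flatMap (fun c => if c = Char.ofNat (48 + (8:Int).toNat) then List.replicate ((8:Int).toNat) '_' else [c])
      (List.flatMap (fun c => if c = Char.ofNat (48 + (7:Int).toNat) then List.replicate ((7:Int).toNat) '_' else [c])
      (List.flatMap (fun c => if c = Char.ofNat (48 + (6:Int).toNat) then List.replicate ((6:Int).toNat) '_' else [c])
      (List.flatMap (fun c => if c = Char.ofNat (48 + (5:Int).toNat) then List.replicate ((5:Int).toNat) '_' else [c])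
      (List.flatMap (fun c => if c = Char.ofNat (48 + (4:Int).toNat) then List.replicate ((4:Int).toNat) '_' else [c])
      (List.flatMap (fun c => if c = Char.ofNat (48 + (3:Int).toNat) then List.replicate ((3:Int).toNat) '_' else [c])
      (List.flatMap (fun c => if c = Char.ofNat (48 + (2:Int).toNat) then List.replicate ((2:Int).toNat) '_' else [c])
      (List.flatMap (fun c => if c = Char.ofNat (48 + (1:Int).toNat) then List.replicate ((1:Int).toNat) '_' else [c])
      (List.flatMap (fun c => if c = Char.ofNat (48 + (0:Int).toNat) then List.replicate ((0:Int).toNat) '_' else [c])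
      l))))))))))
      = l.flatMap (fun c =>
          if PySem.Chars.isdigit c then
            List.replicate ((PySem.Int.ofChars? [c]).getD 0).toNat '_'
          else [c]) := by
  induction l with
  | nil => simp
  | cons c t ih =>
      simp only [List.flatMap_cons, List.flatMap_append, ih]
      rw [pv_chain]

-- A's fold, rewritten as one flatMap of its per-char piece
lemma pv_foldA (l : List Char) (acc : List Char) :
    l.foldl
      (fun acc c =>
        if PySem.Chars.isdigit c then
          acc ++ List.replicate ((PySem.Int.ofChars? [c]).getD 0).toNat '_'
        else acc ++ [c]) acc
      = acc ++ l.flatMap (fun c =>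
          if PySem.Chars.isdigit c then
            List.replicate ((PySem.Int.ofChars? [c]).getD 0).toNat '_'
          else [c]) := by
  induction l generalizing acc with
  | nil => simp
  | cons c t ih =>
      rw [List.foldl_cons, ih, List.flatMap_cons]
      split <;> simp

-- ===== VERDICT (by name: the statement is the Claim_ definition above) =====
theorem expand_rank_spec : Claim_equal_expand_rank := by
  intro s _
  unfold Spec_expand_rank expand_rank expand_rank_alt
  have hr : PySem.List.pyRange 0 10 1 = [0,1,2,3,4,5,6,7,8,9] := by decide
  rw [hr]
  simp only [List.foldl_cons, List.foldl_nil, PySem.Str.replace, String.toList_ofList]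
  rw [pv_foldA]
  simp only [pv_replace_single]
  rw [pv_chainList]
  simp
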